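-- pv_equiv track=rewrite | github.com/natthakit-gif/L02 | P8.py | diatonic
-- ===== SOURCE A (Python) =====
-- def diatonic(scale_key):
--     intervals = [2, 2, 1, 2, 2, 2]
--     scale = [scale_key]
--
--     current_note = scale_key
--     for interval in intervals:
--         current_note = (current_note + interval - 1) % 12 + 1
--         scale.append(current_note)
--
--     return scale
-- ===== SOURCE B (Python) =====
-- def diatonic(scale_key):
--     # Each note computed directly from the base key via cumulative offsets,
--     # rather than step-by-step from the previous note.
--     return [scale_key] + [(scale_key - 1 + off) % 12 + 1 for off in (2, 4, 5, 7, 9, 11)]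
-- ===== Notes on version B (the rewrite author's own statement) =====
-- stated objective: simpler
-- what changed: Replaced the sequential accumulator (each note derived from the previous note) with a closed-form cumulative-offset table: each note is computed directly from the base key plus its fixed offset, wrapped into octave range.
import Mathlib
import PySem

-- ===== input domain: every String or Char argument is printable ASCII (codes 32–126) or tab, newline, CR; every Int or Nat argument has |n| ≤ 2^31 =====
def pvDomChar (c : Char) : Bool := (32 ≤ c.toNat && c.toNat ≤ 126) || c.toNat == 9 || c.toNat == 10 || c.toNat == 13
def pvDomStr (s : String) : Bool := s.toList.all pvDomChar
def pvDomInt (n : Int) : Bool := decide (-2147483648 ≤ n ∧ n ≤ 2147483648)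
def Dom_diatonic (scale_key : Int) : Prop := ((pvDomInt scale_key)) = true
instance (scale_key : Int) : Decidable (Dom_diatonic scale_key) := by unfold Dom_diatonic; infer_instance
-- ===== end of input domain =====

-- B computes each note directly from the base key via a cumulative-offset table
-- instead of A's step-by-step accumulator; objective: simpler.


-- ===== PORT A =====
def diatonic (scale_key : Int) : List Int :=
  let intervals : List Int := [2, 2, 1, 2, 2, 2]
  let init : List Int × Int := ([scale_key], scale_key)
  (intervals.foldl (fun st interval =>
    let current_note := PySem.Int.mod (st.2 + interval - 1) 12 + 1
    (st.1 ++ [current_note], current_note)) init).1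

-- ===== PORT B =====
def diatonic_alt (scale_key : Int) : List Int :=
  scale_key :: ([2, 4, 5, 7, 9, 11] : List Int).map
    (fun off => PySem.Int.mod (scale_key - 1 + off) 12 + 1)

-- ===== PRECONDITION & SPEC =====
def Spec_diatonic (scale_key : Int) (out : List Int) : Prop := out = diatonic_alt scale_key
instance (scale_key : Int) (out : List Int) : Decidable (Spec_diatonic scale_key out) := by unfold Spec_diatonic; infer_instance

-- ===== CLAIM (what is proved, stated in full; the proofs are below) =====
def Claim_equal_diatonic : Prop := ∀ (scale_key : Int), Dom_diatonic scale_key → Spec_diatonic scale_key (diatonic scale_key)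

-- ===== LEMMAS AND PROOFS =====

-- ===== VERDICT (by name: the statement is the Claim_ definition above) =====
theorem diatonic_spec : Claim_equal_diatonic := by
  intro k _
  unfold Spec_diatonic diatonic diatonic_alt
  simp only [List.foldl, List.map]
  simp only [show ∀ a : Int, PySem.Int.mod a 12 = a % 12 from
    fun a => PySem.Int.mod_eq_emod_of_pos (by norm_num)]
  simp only [List.cons_append, List.nil_append, List.cons.injEq, and_true]
  refine ⟨trivial, by omega, by omega, by omega, by omega, by omega, by omega⟩
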